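-- pv_equiv track=rewrite | github.com/russon77/daily-programmer-reddit | 275e/splurthian.py | valid_splurthian
-- ===== SOURCE A (Python) =====
-- def valid_splurthian(element, short):
--     # rule 1: length of symbol must be two letters
--     if len(short) != 2:
--         return False
--
--     element = element.lower()
--     short = short.lower()
--
--     # rule 2: both letters in short must appear in element name
--     if not all([_ in element for _ in short]):
--         return False
--
--     # rule 3: if the short is two of the same letters, it must appear twice. otherwise, check rule 4
--     if short[0] == short[1]:
--         if element.count(short[0]) < 2:
--             return False
--     # rule 4: one instance of first letter in short must appear in element before second letter -- or reversed!
--     else: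
--         if short[1] not in element[element.index(short[0]):]:
--             return False
--
--     return True
-- ===== SOURCE B (Python) =====
-- def valid_splurthian(element, short):
--     # rule 1: length of symbol must be two letters
--     if len(short) != 2:
--         return False
--
--     element = element.lower()
--     short = short.lower()
--
--     # single greedy pass: short must be a subsequence of element
--     # (subsumes membership, the doubled-letter count rule, and the order rule)
--     j = 0
--     for c in element:
--         if j < len(short) and c == short[j]:
--             j += 1
--     return j == len(short)
-- ===== Notes on version B (the rewrite author's own statement) =====
-- stated objective: simpler
-- what changed: Replaced the three-rule case analysis (membership all(), doubled-letter count>=2, index/slice ordering) by a single greedy subsequence scan over the element with a pointer into the symbol.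
import Mathlib
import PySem

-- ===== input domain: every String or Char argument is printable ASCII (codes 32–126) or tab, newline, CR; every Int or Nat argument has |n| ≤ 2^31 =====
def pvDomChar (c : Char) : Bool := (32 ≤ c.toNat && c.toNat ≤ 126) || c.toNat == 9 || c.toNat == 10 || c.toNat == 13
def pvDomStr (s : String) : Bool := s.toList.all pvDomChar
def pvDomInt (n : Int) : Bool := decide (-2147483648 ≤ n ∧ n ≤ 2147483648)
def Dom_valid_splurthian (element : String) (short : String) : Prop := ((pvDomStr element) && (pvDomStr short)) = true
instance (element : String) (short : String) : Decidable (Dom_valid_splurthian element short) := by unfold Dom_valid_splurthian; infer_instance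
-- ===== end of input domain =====

-- B replaces A's three-rule case split by one greedy subsequence scan (objective: simpler; same return value everywhere).

-- ===== PORT A =====
-- literal transliteration of A; `c in element` for a single char c is char membership (exact), `element.count` /
-- `element.index` on a single char are PySem.List.count / PySem.List.index? (exact); the `none` / `_, _` fallbacks
-- are unreachable (rule 2 guards .index; the length guard guarantees two characters).
def valid_splurthian (element : String) (short : String) : Bool :=
  if PySem.Str.len short != 2 then false
  else
    let e := PySem.Chars.lower element.toList
    let s := PySem.Chars.lower short.toList
    if !(s.all (fun c => e.contains c)) then false
    else
      match PySem.List.pyGet? s 0, PySem.List.pyGet? s 1 with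
      | some c0, some c1 =>
        if c0 == c1 then
          if PySem.List.count e c0 < 2 then false else true
        else
          match PySem.List.index? e c0 with
          | some i =>
            if !((PySem.List.slice e (some (i : Int)) none).contains c1) then false else true
          | none => false
      | _, _ => false

-- ===== PORT B =====
-- literal transliteration of Source B: pointer j over short, advanced on each matching element character.
def valid_splurthian_alt (element : String) (short : String) : Bool :=
  if PySem.Str.len short != 2 then false
  else
    let e := PySem.Chars.lower element.toList
    let s := PySem.Chars.lower short.toList
    let j := e.foldl (fun j c => if j < s.length && s.getD j ' ' == c then j + 1 else j) 0
    j == s.length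

-- ===== PRECONDITION & SPEC =====
def Spec_valid_splurthian (element : String) (short : String) (out : Bool) : Prop := out = valid_splurthian_alt element short
instance (element : String) (short : String) (out : Bool) : Decidable (Spec_valid_splurthian element short out) := by unfold Spec_valid_splurthian; infer_instance

-- ===== CLAIM (what is proved, stated in full; the proofs are below) =====
def Claim_equal_valid_splurthian : Prop := ∀ (element : String) (short : String), Dom_valid_splurthian element short → Spec_valid_splurthian element short (valid_splurthian element short)

-- ===== LEMMAS AND PROOFS =====

-- "[c0, c1] is a subsequence of the list": the common value of both post-guard bodies
def sub2 (c0 c1 : Char) : List Char → Bool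
  | [] => false
  | c :: cs => if c == c0 then cs.contains c1 else sub2 c0 c1 cs

-- B's fold step, named so the fold lemmas stay syntactically stable
def bstep (c0 c1 : Char) (j : Nat) (c : Char) : Nat :=
  if j < 2 && [c0, c1].getD j ' ' == c then j + 1 else j

-- B's fold, started at pointer 2, stays at 2
lemma fold_two (c0 c1 : Char) (e : List Char) :
    e.foldl (bstep c0 c1) 2 = 2 := by
  induction e with
  | nil => rfl
  | cons c cs ih => rw [List.foldl_cons]; exact ih

-- B's fold from pointer 1 reaches 2 exactly when c1 occurs
lemma fold_one (c0 c1 : Char) (e : List Char) :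
    (e.foldl (bstep c0 c1) 1 == 2) = e.contains c1 := by
  induction e with
  | nil => rfl
  | cons c cs ih =>
    rw [List.foldl_cons]
    by_cases h : c1 = c
    · have hb : bstep c0 c1 1 c = 2 := by simp [bstep, h]
      rw [hb, fold_two]
      simp [h]
    · have hb : bstep c0 c1 1 c = 1 := by simp [bstep, h]
      rw [hb, ih]
      simp [h]

-- B's fold from pointer 0 reaches 2 exactly when [c0, c1] is a subsequence
lemma fold_zero (c0 c1 : Char) (e : List Char) :
    (e.foldl (bstep c0 c1) 0 == 2) = sub2 c0 c1 e := by
  induction e with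
  | nil => rfl
  | cons c cs ih =>
    rw [List.foldl_cons]
    by_cases h : c0 = c
    · have hb : bstep c0 c1 0 c = 1 := by simp [bstep, h]
      rw [hb, fold_one]
      simp [sub2, h]
    · have hb : bstep c0 c1 0 c = 0 := by simp [bstep, h]
      have hne : (c == c0) = false := by simp [Ne.symm h]
      rw [hb, ih]
      simp [sub2, hne]

-- sub2 implies both letters occur
lemma sub2_mem (c0 c1 : Char) (e : List Char) (h : sub2 c0 c1 e = true) :
    e.contains c0 = true ∧ e.contains c1 = true := by
  induction e with
  | nil => simp [sub2] at h
  | cons c cs ih =>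
    simp only [sub2] at h
    by_cases hc : (c == c0) = true
    · simp only [hc, if_pos] at h
      have hc' : c = c0 := by simpa using hc
      have h1 : c1 ∈ cs := by simpa [List.contains_iff_mem] using h
      exact ⟨by simp [hc'], by simp [h1]⟩
    · rw [if_neg (by simpa using hc)] at h
      rcases ih h with ⟨h0, h1⟩
      have h0' : c0 ∈ cs := by simpa [List.contains_iff_mem] using h0
      have h1' : c1 ∈ cs := by simpa [List.contains_iff_mem] using h1
      exact ⟨by simp [h0'], by simp [h1']⟩

-- Bool membership as a count bound
lemma contains_eq_count (c : Char) (cs : List Char) :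
    cs.contains c = decide (1 ≤ PySem.List.count cs c) := by
  simp [PySem.List.count_eq, Nat.one_le_iff_ne_zero, List.count_eq_zero]

-- doubled letter: sub2 means the letter occurs at least twice
lemma sub2_self (c : Char) (e : List Char) :
    sub2 c c e = decide (2 ≤ PySem.List.count e c) := by
  induction e with
  | nil => rfl
  | cons c' cs ih =>
    by_cases h : c' = c
    · rw [h]
      simp only [sub2, BEq.rfl, if_pos, contains_eq_count, PySem.List.count_eq,
        List.count_cons_self]
      simp only [decide_eq_decide]
      omega
    · have hne : (c' == c) = false := by simp [h]
      have hcnt : List.count c (c' :: cs) = List.count c cs := by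
        simp [h]
      simp only [sub2, hne, Bool.false_eq_true, if_false, ih, PySem.List.count_eq, hcnt]
      rfl

-- distinct letters: sub2 is exactly A's index-then-slice membership test
lemma sub2_ne (c0 c1 : Char) (hne : c0 ≠ c1) (e : List Char) :
    sub2 c0 c1 e = (match PySem.List.index? e c0 with
      | some i => (PySem.List.slice e (some (i : Int)) none).contains c1
      | none => false) := by
  induction e with
  | nil => simp [sub2, PySem.List.index?_eq_idxOf?]
  | cons c cs ih =>
    by_cases h : c = c0
    · subst h
      rw [PySem.List.index?_cons_self]
      have hsl : PySem.List.slice (c :: cs) (some ((0 : Nat) : Int)) none = (c :: cs).drop 0 :=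
        PySem.List.slice_from_natCast _ _
      simp only [Int.natCast_zero] at hsl
      simp [sub2, hsl, Ne.symm hne]
    · rw [PySem.List.index?_cons_of_ne _ h]
      have hne2 : (c == c0) = false := by simp [h]
      cases hidx : PySem.List.index? cs c0 with
      | none =>
        simp only [sub2, hne2, Bool.false_eq_true, if_false, ih, hidx, Option.map_none]
      | some i =>
        have hs1 : PySem.List.slice (c :: cs) (some ((i + 1 : Nat) : Int)) none = (c :: cs).drop (i + 1) :=
          PySem.List.slice_from_natCast _ _
        have hs2 : PySem.List.slice cs (some ((i : Nat) : Int)) none = cs.drop i :=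
          PySem.List.slice_from_natCast _ _
        simp only [sub2, hne2, Bool.false_eq_true, if_false, ih, hidx, Option.map_some,
          hs1, hs2, List.drop_succ_cons]

-- the heart: A's post-guard body equals the greedy-scan result, for any element list and any two letters
lemma key (e : List Char) (c0 c1 : Char) :
    (if !([c0, c1].all (fun c => e.contains c)) then false
     else
       if c0 == c1 then
         if PySem.List.count e c0 < 2 then false else true
       else
         match PySem.List.index? e c0 with
         | some i => if !((PySem.List.slice e (some (i : Int)) none).contains c1) then false else true
         | none => false)
    = (e.foldl (bstep c0 c1) 0 == 2) := by
  rw [fold_zero]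
  by_cases hm0 : e.contains c0 = true
  · by_cases hm1 : e.contains c1 = true
    · simp only [List.all_cons, List.all_nil, hm0, hm1, Bool.and_true,
        Bool.not_true, Bool.false_eq_true, if_false]
      by_cases hc : c0 = c1
      · subst hc
        simp only [BEq.rfl, if_pos, sub2_self]
        by_cases h2 : PySem.List.count e c0 < 2
        · rw [if_pos h2]
          exact (decide_eq_false (by omega)).symm
        · rw [if_neg h2]
          exact (decide_eq_true (by omega)).symm
      · have hbe : (c0 == c1) = false := by simp [hc]
        rw [sub2_ne c0 c1 hc]
        simp only [hbe, Bool.false_eq_true, if_false]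
        cases PySem.List.index? e c0 with
        | none => rfl
        | some i =>
          by_cases hcon : (PySem.List.slice e (some (i : Int)) none).contains c1 = true
          · simp only [hcon, Bool.not_true, Bool.false_eq_true, if_false]
          · simp only [Bool.eq_false_iff.mpr hcon, Bool.not_false, if_true]
    · have hm1' : c1 ∉ e := by simpa [List.contains_iff_mem] using hm1
      have hall : ([c0, c1].all fun c => e.contains c) = false := by simp [hm1']
      have hs : sub2 c0 c1 e = false := by
        cases hsb : sub2 c0 c1 e
        · rfl
        · exact absurd (sub2_mem c0 c1 e hsb).2 hm1
      rw [hall, hs]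
      simp
  · have hm0' : c0 ∉ e := by simpa [List.contains_iff_mem] using hm0
    have hall : ([c0, c1].all fun c => e.contains c) = false := by simp [hm0']
    have hs : sub2 c0 c1 e = false := by
      cases hsb : sub2 c0 c1 e
      · rfl
      · exact absurd (sub2_mem c0 c1 e hsb).1 hm0
    rw [hall, hs]
    simp

-- ===== VERDICT (by name: the statement is the Claim_ definition above) =====
theorem valid_splurthian_spec : Claim_equal_valid_splurthian := by
  intro element short _
  unfold Spec_valid_splurthian valid_splurthian valid_splurthian_alt
  by_cases hlen : short.toList.length = 2
  · rcases List.length_eq_two.mp hlen with ⟨a, b, hab⟩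
    have hg : (PySem.Str.len short != 2) = false := by
      simp [PySem.Str.len_eq, hlen]
    rw [hg]
    simp only [Bool.false_eq_true, if_false]
    have hs : PySem.Chars.lower short.toList = [PySem.Chars.lowerChar a, PySem.Chars.lowerChar b] := by
      simp [hab, PySem.Chars.lower]
    rw [hs]
    have hget0 : PySem.List.pyGet? [PySem.Chars.lowerChar a, PySem.Chars.lowerChar b] 0
        = some (PySem.Chars.lowerChar a) := PySem.List.pyGet?_zero_cons _ _
    have hget1 : PySem.List.pyGet? [PySem.Chars.lowerChar a, PySem.Chars.lowerChar b] 1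
        = some (PySem.Chars.lowerChar b) := by
      simp [PySem.List.pyGet?, PySem.List.pyIdx?]
    rw [hget0, hget1]
    exact key (PySem.Chars.lower element.toList) (PySem.Chars.lowerChar a) (PySem.Chars.lowerChar b)
  · have hlen' : short.length ≠ 2 := fun hc => hlen (by rw [String.length_toList, hc])
    have hne : ((short.length : Int) ≠ 2) := fun hc => hlen' (by exact_mod_cast hc)
    have hg : (PySem.Str.len short != 2) = true := by
      simp [PySem.Str.len_eq, hne]
    rw [hg]
    rfl
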